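-- pv_equiv track=rewrite | github.com/Horse64/core.horse64.org | tools/translator_syntaxhelpers.py | identifier_or_keyword
-- ===== SOURCE A (Python) =====
-- def identifier_or_keyword(x):
--     if x == "" or type(x) != str:
--         return False
--     i = 0
--     while i < len(x):
--         if (x[i] != "_" and
--                 (ord(x[i]) < ord("a") or ord(x[i]) > ord("z")) and
--                 (ord(x[i]) < ord("A") or ord(x[i]) > ord("Z")) and
--                 (ord(x[i]) < ord("0") or ord(x[i]) > ord("9")
--                  or i == 0) and
--                 ord(x[i]) <= 127):
--             return False
--         i += 1
--     return True
-- ===== SOURCE B (Python) =====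
-- import re
--
-- _IDENT_RE = re.compile(r'(?:[A-Za-z_]|[^\x00-\x7f])(?:[A-Za-z0-9_]|[^\x00-\x7f])*')
--
-- def identifier_or_keyword(x):
--     if x == "" or type(x) != str:
--         return False
--     return bool(_IDENT_RE.fullmatch(x))
-- ===== Notes on version B (the rewrite author's own statement) =====
-- stated objective: idiomatic
-- what changed: Replaces the index-based while loop with hand-written ord range tests by a single precompiled regex fullmatch whose first/rest character classes encode the position-0 digit rule declaratively.
import Mathlib
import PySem

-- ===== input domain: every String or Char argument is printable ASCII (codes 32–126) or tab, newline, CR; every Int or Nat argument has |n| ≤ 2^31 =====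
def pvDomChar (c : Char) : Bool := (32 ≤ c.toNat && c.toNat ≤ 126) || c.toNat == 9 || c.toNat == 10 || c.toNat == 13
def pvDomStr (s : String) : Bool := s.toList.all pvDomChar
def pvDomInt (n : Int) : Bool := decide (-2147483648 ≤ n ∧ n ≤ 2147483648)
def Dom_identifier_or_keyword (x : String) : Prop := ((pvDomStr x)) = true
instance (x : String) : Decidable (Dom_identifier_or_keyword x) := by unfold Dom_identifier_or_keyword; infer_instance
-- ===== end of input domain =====

-- B replaces A's manual index loop by a regex fullmatch; ported here as the
-- head/rest character-class decomposition that regex denotes (idiomatic, same cost).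

-- ===== PORT A =====
-- while loop of A: at index i, reject unless '_' / letter / (digit and i ≠ 0) / ord > 127
def identifierLoopA (cs : List Char) (i : Nat) : Bool :=
  if h : i < cs.length then
    if (decide (cs[i] ≠ '_') &&
        (decide (cs[i].toNat < 97) || decide (cs[i].toNat > 122)) &&
        (decide (cs[i].toNat < 65) || decide (cs[i].toNat > 90)) &&
        (decide (cs[i].toNat < 48) || decide (cs[i].toNat > 57) || decide (i = 0)) &&
        decide (cs[i].toNat ≤ 127)) then
      false
    else
      identifierLoopA cs (i + 1)
  else
    true
termination_by cs.length - i

def identifier_or_keyword (x : String) : Bool :=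
  if x = "" then false
  else identifierLoopA x.toList 0

-- ===== PORT B =====
-- the regex's first character class (?:[A-Za-z_]|[^\x00-\x7f])
def reFirst (c : Char) : Bool :=
  (65 ≤ c.toNat && c.toNat ≤ 90) || (97 ≤ c.toNat && c.toNat ≤ 122) ||
  c = '_' || c.toNat > 127

-- the regex's repeated class (?:[A-Za-z0-9_]|[^\x00-\x7f])
def reRest (c : Char) : Bool :=
  reFirst c || (48 ≤ c.toNat && c.toNat ≤ 57)

-- fullmatch of (?:first)(?:rest)* : head matches first, every later char matches rest
def identifier_or_keyword_alt (x : String) : Bool :=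
  if x = "" then false
  else
    match x.toList with
    | [] => false
    | c :: cs => reFirst c && cs.all reRest

-- ===== PRECONDITION & SPEC =====
def Spec_identifier_or_keyword (x : String) (out : Bool) : Prop := out = identifier_or_keyword_alt x
instance (x : String) (out : Bool) : Decidable (Spec_identifier_or_keyword x out) := by unfold Spec_identifier_or_keyword; infer_instance

-- ===== CLAIM (what is proved, stated in full; the proofs are below) =====
def Claim_equal_identifier_or_keyword : Prop := ∀ (x : String), Dom_identifier_or_keyword x → Spec_identifier_or_keyword x (identifier_or_keyword x)

-- ===== LEMMAS AND PROOFS =====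

-- A's per-character reject test, negated, is exactly reRest when i ≥ 1
theorem acceptA_rest (c : Char) (i : Nat) (hi : i ≠ 0) :
    (!(decide (c ≠ '_') &&
        (decide (c.toNat < 97) || decide (c.toNat > 122)) &&
        (decide (c.toNat < 65) || decide (c.toNat > 90)) &&
        (decide (c.toNat < 48) || decide (c.toNat > 57) || decide (i = 0)) &&
        decide (c.toNat ≤ 127))) = reRest c := by
  by_cases h : c = '_'
  · subst h; simp [reRest, reFirst, hi]
  · simp [reRest, reFirst, hi, h]
    rw [Bool.eq_iff_iff]
    simp only [Bool.or_eq_true, Bool.and_eq_true, Bool.not_eq_true', decide_eq_true_eq,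
      decide_eq_false_iff_not]
    omega

-- A's per-character reject test, negated, at i = 0 is exactly reFirst
theorem acceptA_first (c : Char) :
    (!(decide (c ≠ '_') &&
        (decide (c.toNat < 97) || decide (c.toNat > 122)) &&
        (decide (c.toNat < 65) || decide (c.toNat > 90)) &&
        (decide (c.toNat < 48) || decide (c.toNat > 57) || decide ((0:Nat) = 0)) &&
        decide (c.toNat ≤ 127))) = reFirst c := by
  by_cases h : c = '_'
  · subst h; simp [reFirst]
  · simp [reFirst, h]
    rw [Bool.eq_iff_iff]
    simp only [Bool.or_eq_true, Bool.and_eq_true, Bool.not_eq_true', decide_eq_true_eq,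
      decide_eq_false_iff_not]
    omega

-- from index i ≥ 1, A's loop checks exactly reRest on the suffix
theorem loopA_ge_one (cs : List Char) (i : Nat) (hi : i ≠ 0) :
    identifierLoopA cs i = (cs.drop i).all reRest := by
  by_cases h : i < cs.length
  · rw [identifierLoopA, dif_pos h]
    have hdrop : cs.drop i = cs[i] :: cs.drop (i + 1) := List.drop_eq_getElem_cons h
    have ih := loopA_ge_one cs (i + 1) (Nat.succ_ne_zero i)
    have hbig : (decide (cs[i] ≠ '_') &&
        (decide (cs[i].toNat < 97) || decide (cs[i].toNat > 122)) &&
        (decide (cs[i].toNat < 65) || decide (cs[i].toNat > 90)) &&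
        (decide (cs[i].toNat < 48) || decide (cs[i].toNat > 57) || decide (i = 0)) &&
        decide (cs[i].toNat ≤ 127)) = !reRest cs[i] := by
      rw [← acceptA_rest cs[i] i hi]; simp
    rw [hdrop, List.all_cons, hbig]
    cases hr : reRest cs[i] <;> simp [ih]
  · rw [identifierLoopA]
    simp only [h, dif_neg, not_false_iff]
    rw [List.drop_eq_nil_of_le (Nat.le_of_not_lt h)]
    simp
termination_by cs.length - i

theorem loopA_zero (c : Char) (cs : List Char) :
    identifierLoopA (c :: cs) 0 = (reFirst c && cs.all reRest) := by
  rw [identifierLoopA, dif_pos (by simp : 0 < (c :: cs).length)]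
  have hrest : identifierLoopA (c :: cs) 1 = cs.all reRest := by
    simpa using loopA_ge_one (c :: cs) 1 one_ne_zero
  have hbig : (decide (c ≠ '_') &&
      (decide (c.toNat < 97) || decide (c.toNat > 122)) &&
      (decide (c.toNat < 65) || decide (c.toNat > 90)) &&
      (decide (c.toNat < 48) || decide (c.toNat > 57) || decide ((0:Nat) = 0)) &&
      decide (c.toNat ≤ 127)) = !reFirst c := by
    rw [← acceptA_first c]; simp
  rw [List.getElem_cons_zero, hbig]
  cases hr : reFirst c <;> simp [hrest]

-- ===== VERDICT (by name: the statement is the Claim_ definition above) =====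
theorem identifier_or_keyword_spec : Claim_equal_identifier_or_keyword := by
  intro x _
  unfold Spec_identifier_or_keyword identifier_or_keyword identifier_or_keyword_alt
  by_cases hx : x = ""
  · simp [hx]
  · simp only [hx, if_false]
    cases hl : x.toList with
    | nil =>
        exact absurd (String.toList_inj.mp (by simp [hl])) hx
    | cons c cs =>
        rw [loopA_zero]
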